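-- pv_equiv track=rewrite | github.com/Kyuwon-Choi/Algorithm | 백준/Silver/14584. 암호 해독/암호 해독.py | findOriginal
-- ===== SOURCE A (Python) =====
-- def findOriginal(word, code):
--     for i in range(26):
--         temp=""
--         for j in code:
--             temp+=chr((ord(j)-ord('a')+i)%26+ord('a'))
--             #파이썬에서 아스키코드 변환 함수 -> ord
--             #아스키코드에서 문자로 변환 함수 -> chr
--
--         if word in temp:
--             return temp
--
--     return None
-- ===== SOURCE B (Python) =====
-- def findOriginal(word, code):
--     def shift(s, i):
--         return "".join(chr((ord(c) - 97 + i) % 26 + 97) for c in s)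
--
--     if not word:
--         return shift(code, 0)
--     best = None
--     for k in range(len(code) - len(word) + 1):
--         # the only shift that could map code[k] onto word[0]
--         i = (ord(word[0]) - ord(code[k])) % 26
--         if (best is None or i < best) and all(
--             chr((ord(code[k + t]) - 97 + i) % 26 + 97) == word[t]
--             for t in range(len(word))
--         ):
--             best = i
--     return shift(code, best) if best is not None else None
-- ===== Notes on version B (the rewrite author's own statement) =====
-- stated objective: faster
-- what changed: Instead of building all 26 shifted copies of code and substring-searching each, B scans each alignment position once, derives the unique shift that could map code[k] onto word[0], verifies it char-by-char, and keeps the smallest verified shift.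
import Mathlib
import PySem

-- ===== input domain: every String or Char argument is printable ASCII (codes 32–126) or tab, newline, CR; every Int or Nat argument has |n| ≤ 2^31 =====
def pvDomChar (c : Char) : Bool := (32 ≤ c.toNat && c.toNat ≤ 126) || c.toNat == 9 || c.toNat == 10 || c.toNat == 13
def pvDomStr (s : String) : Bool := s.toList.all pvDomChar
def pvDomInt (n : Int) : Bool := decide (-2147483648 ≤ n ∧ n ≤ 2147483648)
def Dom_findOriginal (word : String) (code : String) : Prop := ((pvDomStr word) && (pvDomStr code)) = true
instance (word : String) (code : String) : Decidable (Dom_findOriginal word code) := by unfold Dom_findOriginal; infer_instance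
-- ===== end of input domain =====

-- B derives the one candidate shift from each alignment of word inside code and verifies it,
-- instead of building all 26 shifted copies and substring-searching each (objective: faster; a timing run measured B faster).

-- chr((ord(j) - ord('a') + i) % 26 + ord('a')) — the character transform both programs use
def pvShift (i : Int) (c : Char) : Char :=
  Char.ofNat (PySem.Int.mod ((c.toNat : Int) - 97 + i) 26 + 97).toNat

-- ===== PORT A =====
def findOriginalGo (word : String) (code : String) : List Int → Option String
  | [] => none
  | i :: rest =>
      let temp : List Char := code.toList.foldl (fun acc j => acc ++ [pvShift i j]) []
      if PySem.Chars.isIn word.toList temp then some (String.ofList temp)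
      else findOriginalGo word code rest

def findOriginal (word : String) (code : String) : Option String :=
  findOriginalGo word code (PySem.List.pyRange 0 26 1)

-- ===== PORT B =====
-- "".join(chr((ord(c)-97+i)%26+97) for c in s)
def altShift (cl : List Char) (i : Int) : List Char := cl.map (pvShift i)

-- (ord(word[0]) - ord(code[k])) % 26
def altDerive (w0 : Char) (c : Char) : Int :=
  PySem.Int.mod ((w0.toNat : Int) - (c.toNat : Int)) 26

-- all(chr((ord(code[k+t])-97+i)%26+97) == word[t] for t in range(len(word)))
def altVerify (wl : List Char) (cl : List Char) (k : Nat) (i : Int) : Bool :=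
  (List.range wl.length).all fun t => pvShift i (cl.getD (k + t) ' ') == wl.getD t ' '

def findOriginal_alt (word : String) (code : String) : Option String :=
  let wl := word.toList
  let cl := code.toList
  if wl.isEmpty then some (String.ofList (altShift cl 0))
  else
    let w0 := wl.headD ' '
    let best := (List.range (cl.length + 1 - wl.length)).foldl
      (fun best k =>
        let i := altDerive w0 (cl.getD k ' ')
        if (best.elim true fun b => i < b) && altVerify wl cl k i then some i else best)
      none
    best.map fun i => String.ofList (altShift cl i)

-- ===== PRECONDITION & SPEC =====
def Spec_findOriginal (word : String) (code : String) (out : Option String) : Prop := out = findOriginal_alt word code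
instance (word : String) (code : String) (out : Option String) : Decidable (Spec_findOriginal word code out) := by unfold Spec_findOriginal; infer_instance

-- ===== CLAIM =====
def Claim_equal_findOriginal : Prop := ∀ (word : String) (code : String), Dom_findOriginal word code → Spec_findOriginal word code (findOriginal word code)

-- ===== LEMMAS AND PROOFS =====

-- B's running "best" as an Option-valued minimum fold
def omin (b : Option Int) (xs : List Int) : Option Int :=
  xs.foldl (fun acc i => some (acc.elim i (min · i))) b

theorem omin_some (xs : List Int) (m : Int) : omin (some m) xs = some (xs.foldl min m) := by
  induction xs generalizing m with
  | nil => rfl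
  | cons x xs ih => simpa [omin, List.foldl] using ih (min m x)

theorem omin_none_cons (x : Int) (xs : List Int) :
    omin none (x :: xs) = some (xs.foldl min x) := omin_some xs x

theorem pvShift_toNat (i : Int) (c : Char) :
    ((pvShift i c).toNat : Int) = PySem.Int.mod ((c.toNat : Int) - 97 + i) 26 + 97 := by
  have h1 := PySem.Int.mod_nonneg ((c.toNat : Int) - 97 + i) (b := 26) (by norm_num)
  have h2 := PySem.Int.mod_lt ((c.toNat : Int) - 97 + i) (b := 26) (by norm_num)
  unfold pvShift
  rw [Char.toNat_ofNat, if_pos (Or.inl (by omega))]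
  omega

-- A's loop is find-first over the list of shifts
theorem findOriginalGo_eq_find (word code : String) (l : List Int) :
    findOriginalGo word code l =
      (l.find? fun i => PySem.Chars.isIn word.toList (code.toList.map (pvShift i))).map
        (fun i => String.ofList (code.toList.map (pvShift i))) := by
  induction l with
  | nil => rfl
  | cons i rest ih =>
      rw [findOriginalGo, List.find?_cons]
      simp only [PySem.List.foldl_append_singleton_eq_map, List.nil_append]
      by_cases h : PySem.Chars.isIn word.toList (code.toList.map (pvShift i)) = true
      · simp [h]
      · simp only [Bool.not_eq_true] at h; simp [h, ih]

-- B's fold computes the minimum of the verified derived shifts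
theorem foldB_gen (d : Nat → Int) (v : Nat → Bool) (ks : List Nat) (b : Option Int) :
    ks.foldl (fun best k =>
        if (best.elim true fun m => decide (d k < m)) && v k then some (d k) else best) b
      = omin b ((ks.filter v).map d) := by
  induction ks generalizing b with
  | nil => rfl
  | cons k ks ih =>
      rw [List.foldl_cons, List.filter_cons]
      by_cases hv : v k = true
      · rw [if_pos hv, List.map_cons]
        have hstep : (if ((b.elim true fun m => decide (d k < m)) && v k) = true
              then some (d k) else b)
            = some (b.elim (d k) (min · (d k))) := by
          cases b with
          | none => simp [hv]
          | some m =>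
              by_cases hlt : d k < m
              · rw [if_pos (by simp [hv, hlt])]
                simp [Option.elim, min_eq_right hlt.le]
              · rw [if_neg (by simp [hv, hlt])]
                simp [Option.elim, min_eq_left (le_of_not_gt hlt)]
        rw [hstep, ih]
        rfl
      · have hv' : v k = false := by simpa using hv
        rw [if_neg (by simp [hv'])]
        rw [if_neg (by simp [hv'])]
        exact ih b

-- an admitted alignment k yields exactly the derived shift, and it verifies
theorem match_derive (wl cl : List Char) (i : Int) (hw : wl ≠ [])
    (hi0 : 0 ≤ i) (hi26 : i < 26) (hinf : wl <:+: cl.map (pvShift i)) :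
    ∃ k, k < cl.length + 1 - wl.length ∧
      altVerify wl cl k (altDerive (wl.headD ' ') (cl.getD k ' ')) = true ∧
      altDerive (wl.headD ' ') (cl.getD k ' ') = i := by
  obtain ⟨s, t, hst⟩ := hinf
  have hlen : s.length + (wl.length + t.length) = cl.length := by
    have := congrArg List.length hst
    simpa [List.length_append] using this
  have hwpos : 0 < wl.length := List.length_pos_of_ne_nil hw
  have key : ∀ t' (ht' : t' < wl.length),
      pvShift i (cl[s.length + t']'(by omega)) = wl[t']'ht' := by
    intro t' ht'
    have hb : s.length + t' < (cl.map (pvShift i)).length := by simp; omega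
    have hb' : s.length + t' < (s ++ wl ++ t).length := by
      rw [hst]; exact hb
    have hsl : (s ++ wl).length = s.length + wl.length := by simp
    have hb2 : s.length + t' < (s ++ wl).length := by omega
    have h1 : (s ++ wl ++ t)[s.length + t']'hb' = wl[t']'ht' := by
      rw [List.getElem_append_left hb2, List.getElem_append_right (by omega)]
      congr 1
      omega
    have h2 : (cl.map (pvShift i))[s.length + t']'hb = (s ++ wl ++ t)[s.length + t']'hb' :=
      List.getElem_of_eq hst.symm hb
    simpa using h2.trans h1
  have hk : s.length < cl.length := by omega
  have hgetD : cl.getD s.length ' ' = cl[s.length]'hk := List.getD_eq_getElem cl ' ' hk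
  have h0 : pvShift i (cl[s.length]'hk) = wl.headD ' ' := by
    have := key 0 (by omega)
    obtain ⟨a, wl', rfl⟩ := List.exists_cons_of_ne_nil hw
    simpa using this
  have hD : altDerive (wl.headD ' ') (cl.getD s.length ' ') = i := by
    rw [hgetD]
    have htn := congrArg (fun c => (Char.toNat c : Int)) h0
    simp only at htn
    rw [pvShift_toNat] at htn
    unfold altDerive
    rw [PySem.Int.mod_eq_emod_of_pos (by norm_num)]
    rw [PySem.Int.mod_eq_emod_of_pos (by norm_num)] at htn
    omega
  refine ⟨s.length, by omega, ?_, hD⟩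
  rw [hD]
  unfold altVerify
  rw [List.all_eq_true]
  intro x hx
  have hxw : x < wl.length := List.mem_range.mp hx
  rw [List.getD_eq_getElem cl ' ' (by omega : s.length + x < cl.length),
      List.getD_eq_getElem wl ' ' hxw, beq_iff_eq]
  exact key x hxw

-- a verified derived shift really embeds word into the shifted code
theorem verify_infix (wl cl : List Char) (k : Nat) (i : Int)
    (hk : k < cl.length + 1 - wl.length)
    (hv : altVerify wl cl k i = true) :
    wl <:+: cl.map (pvShift i) := by
  have hkb : k + wl.length ≤ cl.length := by omega
  have hv' : ∀ t (ht : t < wl.length), pvShift i (cl[k + t]'(by omega)) = wl[t]'ht := by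
    intro t ht
    have := (List.all_eq_true.mp hv) t (List.mem_range.mpr ht)
    rw [List.getD_eq_getElem cl ' ' (by omega : k + t < cl.length),
        List.getD_eq_getElem wl ' ' ht, beq_iff_eq] at this
    exact this
  have heq : wl = ((cl.map (pvShift i)).drop k).take wl.length := by
    apply List.ext_getElem
    · simp; omega
    · intro n h1 h2
      rw [List.getElem_take, List.getElem_drop, List.getElem_map]
      exact (hv' n h1).symm
  rw [heq]
  exact ((List.take_prefix _ _).isInfix).trans ((List.drop_suffix _ _).isInfix)

-- find-first on a strictly increasing list returns the least satisfying member
theorem find?_sorted (p : Int → Bool) (L : List Int) (m : Int)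
    (hs : L.Pairwise (· < ·)) (hm : m ∈ L) (hpm : p m = true)
    (hleast : ∀ j ∈ L, p j = true → m ≤ j) : L.find? p = some m := by
  induction L with
  | nil => cases hm
  | cons x xs ih =>
      rw [List.find?_cons]
      by_cases hx : p x = true
      · have hmx : m ≤ x := hleast x List.mem_cons_self hx
        rcases List.mem_cons.mp hm with h | h
        · simp [hx, h]
        · exact absurd hmx (not_le.mpr ((List.pairwise_cons.mp hs).1 m h))
      · have hx' : p x = false := by simpa using hx
        rw [hx']
        have hmx : m ∈ xs := by
          rcases List.mem_cons.mp hm with h | h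
          · subst h; rw [hx'] at hpm; cases hpm
          · exact h
        exact ih (List.pairwise_cons.mp hs).2 hmx
          (fun j hj hpj => hleast j (List.mem_cons_of_mem _ hj) hpj)

theorem findOriginal_eq_alt (word code : String) :
    findOriginal word code = findOriginal_alt word code := by
  by_cases hw : word.toList = []
  · -- empty word: both return the shift-0 transform of code
    rw [findOriginal, findOriginalGo_eq_find,
        PySem.List.pyRange_one_cons (by norm_num : (0:Int) < 26), List.find?_cons]
    have h0 : PySem.Chars.isIn word.toList (code.toList.map (pvShift 0)) = true :=
      (PySem.Chars.isIn_iff_infix _ _).mpr (by rw [hw]; exact List.nil_infix)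
    rw [h0]
    simp [findOriginal_alt, hw, altShift]
  · -- nonempty word
    have hie : word.toList.isEmpty = false := by simpa [List.isEmpty_iff] using hw
    set wl := word.toList with hwl
    set cl := code.toList with hcl
    set w0 := wl.headD ' ' with hw0
    set d : Nat → Int := fun k => altDerive w0 (cl.getD k ' ') with hd
    set v : Nat → Bool := fun k => altVerify wl cl k (d k) with hv
    set ks := List.range (cl.length + 1 - wl.length) with hks
    set D := (ks.filter v).map d with hD
    have hAlt : findOriginal_alt word code
        = (omin none D).map (fun i => String.ofList (cl.map (pvShift i))) := by
      show (if wl.isEmpty then some (String.ofList (altShift cl 0))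
        else ((List.range (cl.length + 1 - wl.length)).foldl
          (fun best k =>
            let i := altDerive w0 (cl.getD k ' ')
            if (best.elim true fun b => i < b) && altVerify wl cl k i then some i else best)
          none).map fun i => String.ofList (altShift cl i)) = _
      rw [hie]
      simp only [Bool.false_eq_true, if_false]
      exact congrArg (Option.map _) (foldB_gen d v ks none)
    have hp_iff : ∀ i : Int, 0 ≤ i → i < 26 →
        (PySem.Chars.isIn wl (cl.map (pvShift i)) = true ↔ i ∈ D) := by
      intro i h0 h26
      constructor
      · intro hp
        obtain ⟨k, hk, hvk, hdk⟩ :=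
          match_derive wl cl i hw h0 h26 ((PySem.Chars.isIn_iff_infix _ _).mp hp)
        rw [hD, List.mem_map]
        refine ⟨k, List.mem_filter.mpr ⟨List.mem_range.mpr hk, ?_⟩, hdk⟩
        rw [hv]
        exact hvk
      · intro hiD
        rw [hD, List.mem_map] at hiD
        obtain ⟨k, hkf, hdk⟩ := hiD
        obtain ⟨hkr, hvk⟩ := List.mem_filter.mp hkf
        rw [hv] at hvk
        rw [← hdk]
        exact (PySem.Chars.isIn_iff_infix _ _).mpr
          (verify_infix wl cl k (d k) (List.mem_range.mp hkr) hvk)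
    have hDrange : ∀ j ∈ D, 0 ≤ j ∧ j < 26 := by
      intro j hj
      rw [hD, List.mem_map] at hj
      obtain ⟨k, _, hdk⟩ := hj
      rw [← hdk, hd]
      exact ⟨PySem.Int.mod_nonneg _ (by norm_num), PySem.Int.mod_lt _ (by norm_num)⟩
    rw [findOriginal, findOriginalGo_eq_find, hAlt]
    rcases hcase : D with _ | ⟨x, xs⟩
    · -- no matching shift: both none
      rw [List.find?_eq_none.mpr]
      · rfl
      · intro i hiL hp
        have hir := PySem.List.mem_pyRange_one.mp hiL
        have : i ∈ D := (hp_iff i hir.1 hir.2).mp hp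
        rw [hcase] at this
        cases this
    · -- matching shifts exist: A finds the first = the minimum
      have hm_def : omin none D = some (xs.foldl min x) := by
        rw [hcase]
        exact omin_some xs x
      set m := xs.foldl min x with hmdef
      have hmD : m ∈ D := by
        rw [hcase]
        rcases PySem.List.foldl_min_mem xs x with h | h
        · rw [hmdef, h]; exact List.mem_cons_self
        · exact List.mem_cons_of_mem _ h
      have hmle : ∀ j ∈ D, m ≤ j := by
        intro j hj
        rw [hcase] at hj
        rcases List.mem_cons.mp hj with h | h
        · rw [h]; exact (PySem.List.foldl_min_le xs x).1
        · exact (PySem.List.foldl_min_le xs x).2 j h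
      have hmr := hDrange m hmD
      have hfind : (PySem.List.pyRange 0 26 1).find?
          (fun i => PySem.Chars.isIn wl (cl.map (pvShift i))) = some m := by
        apply find?_sorted _ _ m (by decide)
          (PySem.List.mem_pyRange_one.mpr ⟨hmr.1, hmr.2⟩)
          ((hp_iff m hmr.1 hmr.2).mpr hmD)
        intro j hjL hpj
        have hjr := PySem.List.mem_pyRange_one.mp hjL
        exact hmle j ((hp_iff j hjr.1 hjr.2).mp hpj)
      rw [hfind, omin_none_cons]

-- ===== VERDICT =====
theorem findOriginal_spec : Claim_equal_findOriginal := by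
  intro word code _
  unfold Spec_findOriginal
  exact findOriginal_eq_alt word code
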